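-- pv_equiv track=rewrite | github.com/Lord-KA/mhs-python-hw | hw1/wc.py | wc
-- ===== SOURCE A (Python) =====
-- def wc(inp):
--     lines = 0
--     words = 0
--     chars = 0
--     for line in inp:
--         lines += 1
--         words += len(line.split())
--         chars += len(line)
--     return lines, words, chars
-- ===== SOURCE B (Python) =====
-- def wc(inp):
--     data = list(inp)
--     words = 0
--     chars = 0
--     for line in data:
--         in_word = False
--         for ch in line:
--             chars += 1
--             if ch.isspace():
--                 in_word = False
--             elif not in_word:
--                 words += 1
--                 in_word = True
--     return len(data), words, chars
-- ===== Notes on version B (the rewrite author's own statement) =====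
-- stated objective: alternative
-- what changed: Replaces per-line str.split() word counting with a classic C-wc character-level state machine that counts whitespace-to-nonwhitespace transitions (and characters) in one scan per line, with lines taken as len of the materialized input.
import Mathlib
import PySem

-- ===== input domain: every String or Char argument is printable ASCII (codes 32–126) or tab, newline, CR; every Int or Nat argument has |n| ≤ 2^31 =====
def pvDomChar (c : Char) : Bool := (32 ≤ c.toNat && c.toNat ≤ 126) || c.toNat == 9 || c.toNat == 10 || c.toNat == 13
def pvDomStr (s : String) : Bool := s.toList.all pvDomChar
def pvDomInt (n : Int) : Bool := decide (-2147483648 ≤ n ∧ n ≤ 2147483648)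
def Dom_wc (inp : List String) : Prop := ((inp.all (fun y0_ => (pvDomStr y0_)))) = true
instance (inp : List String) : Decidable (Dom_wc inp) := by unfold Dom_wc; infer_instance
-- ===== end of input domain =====

-- One-line: B counts words with a classic C-wc character-level state machine (whitespace→nonwhitespace transitions) instead of per-line str.split(); objective: alternative algorithm, no intermediate word lists.


-- ===== PORT A =====
-- single fused fold carrying (lines, words, chars), exactly A's loop with str.split()
def wc (inp : List String) : Int × Int × Int :=
  inp.foldl
    (fun (st : Int × Int × Int) line =>
      (st.1 + 1, st.2.1 + ((PySem.Str.split₀ line).length : Int), st.2.2 + PySem.Str.len line))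
    (0, 0, 0)

-- ===== PORT B =====
-- inner character loop of B: state (words, chars, in_word); chars += 1, then the isspace branch
def wcAltStep (s : Int × Int × Bool) (c : Char) : Int × Int × Bool :=
  if PySem.Chars.isspace c then (s.1, s.2.1 + 1, false)
  else if s.2.2 then (s.1, s.2.1 + 1, true)
  else (s.1 + 1, s.2.1 + 1, true)

-- B: lines from the materialized list's length; words/chars by the per-line character FSM
def wc_alt (inp : List String) : Int × Int × Int :=
  let wch :=
    inp.foldl
      (fun (st : Int × Int) line =>
        let r := line.toList.foldl wcAltStep (st.1, st.2, false)
        (r.1, r.2.1))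
      (0, 0)
  ((inp.length : Int), wch.1, wch.2)

-- ===== PRECONDITION & SPEC =====
def Spec_wc (inp : List String) (out : Int × Int × Int) : Prop := out = wc_alt inp
instance (inp : List String) (out : Int × Int × Int) : Decidable (Spec_wc inp out) := by unfold Spec_wc; infer_instance

-- ===== CLAIM (what is proved, stated in full; the proofs are below) =====
def Claim_equal_wc : Prop := ∀ (inp : List String), Dom_wc inp → Spec_wc inp (wc inp)

-- ===== LEMMAS AND PROOFS =====

-- word count of the FSM as a function of the characters and the incoming in_word flag
def cw : List Char → Bool → Nat
  | [], _ => 0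
  | c :: rest, inWord =>
    if PySem.Chars.isspace c then cw rest false
    else (if inWord then 0 else 1) + cw rest true

theorem fsm_fold (cs : List Char) (w ch : Int) (b : Bool) :
    ∃ b', cs.foldl wcAltStep (w, ch, b)
      = (w + (cw cs b : Int), ch + (cs.length : Int), b') := by
  induction cs generalizing w ch b with
  | nil => exact ⟨b, by simp [cw]⟩
  | cons c rest ih =>
    simp only [List.foldl_cons, wcAltStep]
    by_cases hs : PySem.Chars.isspace c = true
    · obtain ⟨b', h⟩ := ih w (ch + 1) false
      refine ⟨b', ?_⟩
      simp [hs, cw, h, Prod.ext_iff]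
      omega
    · cases b with
      | true =>
        obtain ⟨b', h⟩ := ih w (ch + 1) true
        refine ⟨b', ?_⟩
        simp [hs, cw, h, Prod.ext_iff]
        omega
      | false =>
        obtain ⟨b', h⟩ := ih (w + 1) (ch + 1) true
        refine ⟨b', ?_⟩
        simp [hs, cw, h, Prod.ext_iff]
        omega

-- length of split₀.go in terms of the FSM word count
theorem go_len (cs : List Char) (cur : List Char) (acc : List (List Char)) :
    (PySem.Chars.split₀.go cs cur acc).length
      = acc.length + (if cur.isEmpty then 0 else 1) + cw cs (!cur.isEmpty) := by
  induction cs generalizing cur acc with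
  | nil =>
    by_cases h : cur.isEmpty <;> simp [PySem.Chars.split₀.go, h, cw]
  | cons c rest ih =>
    by_cases hs : PySem.Chars.isspace c = true <;>
      by_cases h : cur.isEmpty = true <;>
        simp [PySem.Chars.split₀.go, hs, h, ih, cw] <;> omega

theorem split₀_len (s : String) : (PySem.Str.split₀ s).length = cw s.toList false := by
  have hb : PySem.Str.split₀ s = (PySem.Chars.split₀ s.toList).map String.ofList := by
    simp [PySem.Str.split₀]
  rw [hb, List.length_map, PySem.Chars.split₀, go_len]
  simp

-- outer loops agree, generalizing the accumulators
theorem outer_fold (inp : List String) (l w c : Int) :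
    inp.foldl
      (fun (st : Int × Int × Int) line =>
        (st.1 + 1, st.2.1 + ((PySem.Str.split₀ line).length : Int), st.2.2 + PySem.Str.len line))
      (l, w, c)
      = (l + (inp.length : Int),
         inp.foldl
           (fun (st : Int × Int) line =>
             let r := line.toList.foldl wcAltStep (st.1, st.2, false)
             (r.1, r.2.1))
           (w, c)) := by
  induction inp generalizing l w c with
  | nil => simp
  | cons x xs ih =>
    simp only [List.foldl_cons]
    rw [ih]
    obtain ⟨b', hf⟩ := fsm_fold x.toList w c false
    have h1 : ((PySem.Str.split₀ x).length : Int) = (cw x.toList false : Int) := by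
      rw [split₀_len]
    refine Prod.ext (by simp; omega) ?_
    simp [hf, h1, PySem.Str.len]

-- ===== VERDICT (by name: the statement is the Claim_ definition above) =====
theorem wc_spec : Claim_equal_wc := by
  intro inp _
  show wc inp = wc_alt inp
  unfold wc wc_alt
  rw [outer_fold]
  simp
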